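-- pv_equiv track=rewrite | github.com/SAP/machine-learning-lab | services/lab-workspace/docker-res/duplicated-resources/ml-lab-py/lab_client/utils/experiment_utils.py | get_keys_with_diff_values
-- ===== SOURCE A (Python) =====
-- def get_keys_with_diff_values(dict_list: list):
--     keys_with_diff_values = set()
--     common_keys = set()
--     for d in dict_list:
--         if not common_keys:
--             common_keys = set(d)
--         else:
--             common_keys = common_keys.intersection(set(d))
--
--     combined_dict = {}
--     for d in dict_list:
--         for key in d:
--             if key not in combined_dict:
--                 combined_dict[key] = []
--             combined_dict[key].append(d[key])
--
--     for key in common_keys: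
--         if len(set(combined_dict[key])) > 1:
--             keys_with_diff_values.add(key)
--
--     return keys_with_diff_values
-- ===== SOURCE B (Python) =====
-- def get_keys_with_diff_values(dict_list: list):
--     common_keys = set()
--     for d in dict_list:
--         common_keys = set(d) if not common_keys else common_keys & set(d)
--     return {k for k in common_keys
--             if len({d[k] for d in dict_list if k in d}) > 1}
-- ===== Notes on version B (the rewrite author's own statement) =====
-- stated objective: simpler
-- what changed: B drops A's combined_dict table (built by a nested loop appending every value of every dict) and instead, for each common key, rescans the dicts directly with a set comprehension {d[k] for d in dict_list if k in d}; the whole function becomes the intersection fold plus one comprehension.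
import Mathlib
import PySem

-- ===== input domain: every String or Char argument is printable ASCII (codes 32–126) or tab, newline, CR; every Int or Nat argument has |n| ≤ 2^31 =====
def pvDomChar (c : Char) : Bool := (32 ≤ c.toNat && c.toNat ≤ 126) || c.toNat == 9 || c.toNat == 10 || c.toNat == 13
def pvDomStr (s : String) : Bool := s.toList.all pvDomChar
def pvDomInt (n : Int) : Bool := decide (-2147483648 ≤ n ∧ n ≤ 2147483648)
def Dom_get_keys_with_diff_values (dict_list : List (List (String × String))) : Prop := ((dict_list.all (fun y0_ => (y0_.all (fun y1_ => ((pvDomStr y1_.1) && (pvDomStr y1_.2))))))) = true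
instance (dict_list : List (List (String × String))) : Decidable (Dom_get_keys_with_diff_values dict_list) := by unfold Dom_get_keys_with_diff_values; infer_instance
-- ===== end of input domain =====

-- B drops A's combined_dict value table and rescans the dicts per common key; objective: simpler.


-- ===== PORT A =====
def get_keys_with_diff_values (dict_list : List (List (String × String))) : List String :=
  let common_keys : PySem.Set String :=
    dict_list.foldl (fun ck d =>
      if ck.isEmpty then PySem.Set.ofList (d.map Prod.fst)
      else PySem.Set.inter ck (d.map Prod.fst)) PySem.Set.empty
  let combined_dict : PySem.Dict String (List String) :=
    dict_list.foldl (fun cd d =>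
      (d.map Prod.fst).foldl (fun cd key =>
        let cd' := if cd.contains key then cd else cd.insert key []
        -- 'key' is a key of d here, so Python's d[key] is exactly this getD
        cd'.modify key [] (fun l => l ++ [(PySem.Dict.mk d).getD key ""])) cd)
      PySem.Dict.empty
  common_keys.foldl (fun res key =>
    if (PySem.Set.ofList (combined_dict.getD key [])).length > 1
    then PySem.Set.add res key else res) PySem.Set.empty

-- ===== PORT B =====
def get_keys_with_diff_values_alt (dict_list : List (List (String × String))) : List String :=
  let common_keys : PySem.Set String :=
    dict_list.foldl (fun ck d =>
      if ck.isEmpty then PySem.Set.ofList (d.map Prod.fst)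
      else PySem.Set.inter ck (d.map Prod.fst)) PySem.Set.empty
  PySem.Set.ofList (common_keys.filter (fun k =>
    (PySem.Set.ofList (dict_list.filterMap (fun d => (PySem.Dict.mk d).get? k))).length > 1))

-- ===== PRECONDITION & SPEC =====
def Spec_get_keys_with_diff_values (dict_list : List (List (String × String))) (out : List String) : Prop := out = get_keys_with_diff_values_alt dict_list
instance (dict_list : List (List (String × String))) (out : List String) : Decidable (Spec_get_keys_with_diff_values dict_list out) := by unfold Spec_get_keys_with_diff_values; infer_instance

-- ===== CLAIM (what is proved, stated in full; the proofs are below) =====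
def Claim_equal_get_keys_with_diff_values : Prop := ∀ (dict_list : List (List (String × String))), Dom_get_keys_with_diff_values dict_list → Spec_get_keys_with_diff_values dict_list (get_keys_with_diff_values dict_list)

-- ===== LEMMAS AND PROOFS =====

-- A's inner loop over the keys of one dict, per looked-up key k
theorem combined_inner (k : String) (ks : List String) (v : String → String)
    (cd : PySem.Dict String (List String)) :
    (ks.foldl (fun cd key =>
        (if cd.contains key then cd else cd.insert key []).modify key []
          (fun l => l ++ [v key])) cd).getD k []
      = cd.getD k [] ++ (ks.filter (fun x => x == k)).map v := by
  induction ks generalizing cd with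
  | nil => simp
  | cons key ks ih =>
    simp only [List.foldl_cons, List.filter_cons, ih]
    by_cases hc : cd.contains key = true
    · rw [if_pos hc]
      simp only [PySem.Dict.getD_modify]
      by_cases hk : k = key
      · subst hk; simp
      · simp [hk, Ne.symm hk]
    · rw [if_neg hc]
      simp only [PySem.Dict.getD_modify, PySem.Dict.getD_insert]
      by_cases hk : k = key
      · subst hk
        rw [PySem.Dict.getD_of_not_contains _ _ (by simpa using hc)]
        simp
      · simp [hk, Ne.symm hk]

-- A's whole combined_dict build, per looked-up key k
theorem combined_outer (k : String) (ds : List (List (String × String)))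
    (cd : PySem.Dict String (List String)) :
    (ds.foldl (fun cd d =>
        (d.map Prod.fst).foldl (fun cd key =>
          (if cd.contains key then cd else cd.insert key []).modify key []
            (fun l => l ++ [(PySem.Dict.mk d).getD key ""])) cd) cd).getD k []
      = cd.getD k [] ++ ds.flatMap (fun d =>
          ((d.map Prod.fst).filter (fun x => x == k)).map
            (fun key => (PySem.Dict.mk d).getD key "")) := by
  induction ds generalizing cd with
  | nil => simp
  | cons d ds ih => simp [ih, combined_inner, List.append_assoc]

-- the two per-key value collections have the same members
theorem mem_values_iff (k x : String) (ds : List (List (String × String))) :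
    (x ∈ ds.flatMap (fun d =>
        ((d.map Prod.fst).filter (fun y => y == k)).map
          (fun key => (PySem.Dict.mk d).getD key ""))
      ↔ x ∈ ds.filterMap (fun d => (PySem.Dict.mk d).get? k)) := by
  simp only [List.mem_flatMap, List.mem_map, List.mem_filter, List.mem_filterMap,
    beq_iff_eq]
  constructor
  · rintro ⟨d, hd, key, ⟨hkey, rfl⟩, rfl⟩
    refine ⟨d, hd, ?_⟩
    have hc : (PySem.Dict.mk d).contains key = true := by
      rw [PySem.Dict.contains_eq_decide_mem_keys]
      simpa [PySem.Dict.keys_mk] using hkey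
    rw [PySem.Dict.contains_eq_isSome_get?] at hc
    rcases Option.isSome_iff_exists.mp hc with ⟨w, hw⟩
    rw [hw, PySem.Dict.getD_eq_get?_getD, hw]
    rfl
  · rintro ⟨d, hd, hget⟩
    refine ⟨d, hd, k, ⟨?_, rfl⟩, ?_⟩
    · have hc : (PySem.Dict.mk d).contains k = true := by
        rw [PySem.Dict.contains_eq_isSome_get?, hget]; rfl
      rw [PySem.Dict.contains_eq_decide_mem_keys] at hc
      simpa [PySem.Dict.keys_mk] using hc
    · rw [PySem.Dict.getD_eq_get?_getD, hget]
      rfl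

-- fold that conditionally adds into a fresh set = filter, on a Nodup list
theorem foldl_add_if_eq_filter (p : String → Prop) [DecidablePred p]
    (l : List String) :
    ∀ s : PySem.Set String, l.Nodup → (∀ x ∈ l, x ∉ s) →
      l.foldl (fun r x => if p x then PySem.Set.add r x else r) s
        = s ++ l.filter (fun x => decide (p x)) := by
  induction l with
  | nil => simp
  | cons x l ih =>
    intro s hnd hdisj
    simp only [List.foldl_cons, List.filter_cons]
    by_cases hp : p x
    · rw [if_pos hp, PySem.Set.add_of_not_mem (hdisj x (by simp)),
        ih (s ++ [x]) (List.nodup_cons.mp hnd).2 (by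
          intro y hy
          simp only [List.mem_append, List.mem_singleton, not_or]
          exact ⟨hdisj y (by simp [hy]), fun h => (List.nodup_cons.mp hnd).1 (h ▸ hy)⟩)]
      simp [hp]
    · rw [if_neg hp, ih s (List.nodup_cons.mp hnd).2 (fun y hy => hdisj y (by simp [hy]))]
      simp [hp]

-- the common-keys fold yields a Nodup list
theorem common_nodup (ds : List (List (String × String))) (s : PySem.Set String)
    (hs : s.Nodup) :
    (ds.foldl (fun ck d =>
        if ck.isEmpty then PySem.Set.ofList (d.map Prod.fst)
        else PySem.Set.inter ck (d.map Prod.fst)) s).Nodup := by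
  induction ds generalizing s with
  | nil => exact hs
  | cons d ds ih =>
    simp only [List.foldl_cons]
    by_cases h : s.isEmpty
    · exact ih _ (by rw [if_pos h]; exact PySem.Set.nodup_ofList _)
    · exact ih _ (by rw [if_neg h]; exact PySem.Set.nodup_inter _ _ hs)

-- the per-key tests of A and B agree
theorem tests_agree (k : String) (ds : List (List (String × String))) :
    (PySem.Set.ofList ((ds.foldl (fun cd d =>
        (d.map Prod.fst).foldl (fun cd key =>
          (if cd.contains key then cd else cd.insert key []).modify key []
            (fun l => l ++ [(PySem.Dict.mk d).getD key ""])) cd)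
        PySem.Dict.empty).getD k [])).length
      = (PySem.Set.ofList (ds.filterMap (fun d => (PySem.Dict.mk d).get? k))).length := by
  rw [combined_outer]
  simp only [PySem.Dict.getD_empty, List.nil_append]
  apply List.Perm.length_eq
  rw [List.perm_ext_iff_of_nodup (PySem.Set.nodup_ofList _) (PySem.Set.nodup_ofList _)]
  intro x
  simp only [PySem.Set.mem_ofList]
  exact mem_values_iff k x ds

-- ===== VERDICT (by name: the statement is the Claim_ definition above) =====
theorem get_keys_with_diff_values_spec : Claim_equal_get_keys_with_diff_values := by
  intro dl _
  unfold Spec_get_keys_with_diff_values get_keys_with_diff_values get_keys_with_diff_values_alt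
  simp only [tests_agree]
  have hnd := common_nodup dl PySem.Set.empty List.nodup_nil
  rw [foldl_add_if_eq_filter
      (fun k => (PySem.Set.ofList (dl.filterMap (fun d => (PySem.Dict.mk d).get? k))).length > 1)
      _ _ hnd (by intro x hx; simp [PySem.Set.empty])]
  simp only [PySem.Set.empty, List.nil_append]
  exact (PySem.Set.ofList_eq_self_of_nodup _ (List.Nodup.filter _ hnd)).symm
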